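-- pv_equiv track=rewrite | github.com/puavo-org/puavo-os | debs/linux/debian/lib/python/debian_linux/gencontrol.py | __ruleid_deps
-- ===== SOURCE A (Python) =====
-- import typing
--
-- def __ruleid_deps(ruleid: tuple[str], name: str) -> typing.Iterator[tuple[str, str]]:
--     """
--     Generate all the rules dependencies.
--     ```
--     build: build_a
--     build_a: build_a_b
--     build_a_b: build_a_b_image
--     ```
--     """
--     r = ruleid + (name, )
--     yield (
--         '',
--         '_' + '_'.join(r[:1]),
--     )
--     for i in range(1, len(r)):
--         yield (
--             '_' + '_'.join(r[:i]),
--             '_' + '_'.join(r[:i + 1]),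
--         )
-- ===== SOURCE B (Python) =====
-- def __ruleid_deps(ruleid, name):
--     prefixes = ['']
--     acc = ''
--     for x in list(ruleid) + [name]:
--         acc = acc + '_' + x
--         prefixes.append(acc)
--     yield from zip(prefixes, prefixes[1:])
-- ===== Notes on version B (the rewrite author's own statement) =====
-- stated objective: simpler
-- what changed: B builds the prefix strings once with a running accumulator (no repeated '_'.join over growing slices) and emits consecutive pairs by zipping the prefix list with its tail, removing A's special-cased first yield.
import Mathlib
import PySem

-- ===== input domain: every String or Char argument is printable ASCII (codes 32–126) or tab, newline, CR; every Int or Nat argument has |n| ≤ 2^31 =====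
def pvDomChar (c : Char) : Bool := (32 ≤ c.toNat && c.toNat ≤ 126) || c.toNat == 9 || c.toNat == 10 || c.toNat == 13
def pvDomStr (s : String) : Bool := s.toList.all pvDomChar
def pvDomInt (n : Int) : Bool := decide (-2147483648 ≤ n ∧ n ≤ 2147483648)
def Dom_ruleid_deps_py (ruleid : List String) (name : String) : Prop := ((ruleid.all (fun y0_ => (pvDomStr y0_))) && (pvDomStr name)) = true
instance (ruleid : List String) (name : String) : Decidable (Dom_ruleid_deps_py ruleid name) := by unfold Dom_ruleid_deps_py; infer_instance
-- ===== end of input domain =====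

-- B replaces A's repeated '_'.join over growing slices by a single running-accumulator pass
-- building the prefix list, then pairs consecutive prefixes by zipping the list with its tail (objective: simpler).

-- ===== PORT A =====
def ruleid_deps_py (ruleid : List String) (name : String) : List (String × String) :=
  let r := ruleid ++ [name]
  ("", "_" ++ PySem.Str.join "_" (PySem.List.slice r none (some 1))) ::
  (PySem.List.pyRange 1 (r.length : Int) 1).map (fun i =>
    ("_" ++ PySem.Str.join "_" (PySem.List.slice r none (some i)),
     "_" ++ PySem.Str.join "_" (PySem.List.slice r none (some (i + 1)))))

-- ===== PORT B =====
def ruleid_deps_py_alt (ruleid : List String) (name : String) : List (String × String) :=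
  let st := (ruleid ++ [name]).foldl
      (fun (st : List String × String) x =>
        let acc := st.2 ++ "_" ++ x
        (st.1 ++ [acc], acc)) ([""], "")
  st.1.zip st.1.tail

-- ===== PRECONDITION & SPEC =====
def Spec_ruleid_deps_py (ruleid : List String) (name : String) (out : List (String × String)) : Prop := out = ruleid_deps_py_alt ruleid name
instance (ruleid : List String) (name : String) (out : List (String × String)) : Decidable (Spec_ruleid_deps_py ruleid name out) := by unfold Spec_ruleid_deps_py; infer_instance

-- ===== CLAIM (what is proved, stated in full; the proofs are below) =====
def Claim_equal_ruleid_deps_py : Prop := ∀ (ruleid : List String) (name : String), Dom_ruleid_deps_py ruleid name → Spec_ruleid_deps_py ruleid name (ruleid_deps_py ruleid name)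

-- ===== LEMMAS AND PROOFS =====

/-- The list of accumulator values produced while scanning `l` starting from `acc`. -/
def pvAccs (acc : String) : List String → List String
  | [] => []
  | x :: xs => (acc ++ "_" ++ x) :: pvAccs (acc ++ "_" ++ x) xs

/-- The final accumulator value. -/
def pvLast (acc : String) : List String → String
  | [] => acc
  | x :: xs => pvLast (acc ++ "_" ++ x) xs

/-- Consecutive pairs, seeded with `a`. -/
def pvChain (a : String) : List String → List (String × String)
  | [] => []
  | x :: xs => (a, x) :: pvChain x xs

theorem pv_foldB (l : List String) (ps : List String) (acc : String) :
    l.foldl (fun (st : List String × String) x =>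
        (st.1 ++ [st.2 ++ "_" ++ x], st.2 ++ "_" ++ x)) (ps, acc)
      = (ps ++ pvAccs acc l, pvLast acc l) := by
  induction l generalizing ps acc with
  | nil => simp [pvAccs, pvLast]
  | cons x xs ih => simp [pvAccs, pvLast, ih]

theorem pv_zip_chain (L : List String) (a : String) :
    (a :: L).zip L = pvChain a L := by
  induction L generalizing a with
  | nil => simp [pvChain]
  | cons x xs ih => simp [pvChain, ih]

theorem pv_join_singleton (sep x : String) : PySem.Str.join sep [x] = x := by
  apply String.toList_inj.mp
  simp [PySem.Str.toList_join, PySem.Chars.join_singleton]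

theorem pv_join_cons (sep x y : String) (l : List String) :
    PySem.Str.join sep (x :: y :: l) = x ++ sep ++ PySem.Str.join sep (y :: l) := by
  apply String.toList_inj.mp
  simp [PySem.Str.toList_join, PySem.Chars.join_cons_cons]

theorem pv_accs_eq (r : List String) : ∀ acc,
    pvAccs acc r = (List.range r.length).map
      (fun k => acc ++ "_" ++ PySem.Str.join "_" (r.take (k + 1))) := by
  induction r with
  | nil => intro acc; simp [pvAccs]
  | cons x xs ih =>
    intro acc
    simp only [pvAccs, ih, List.length_cons, List.range_succ_eq_map, List.map_cons,
      List.map_map]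
    congr 1
    · simp [pv_join_singleton]
    · cases xs with
      | nil => simp
      | cons y ys =>
        apply List.map_congr_left
        intro k _
        simp only [Function.comp, List.take_succ_cons, pv_join_cons]
        simp [String.append_assoc]

theorem pv_chain_map_range (n : Nat) : ∀ (f : Nat → String) (a : String),
    pvChain a ((List.range (n + 1)).map f)
      = (a, f 0) :: (List.range n).map (fun k => (f k, f (k + 1))) := by
  induction n with
  | zero => intro f a; simp [pvChain]
  | succ m ih =>
    intro f a
    rw [List.range_succ_eq_map]
    simp only [List.map_cons, List.map_map, pvChain, Function.comp_def,
      Nat.succ_eq_add_one]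
    rw [ih (fun k => f (k + 1)) (f 0)]
    rw [List.range_succ_eq_map]
    simp [Function.comp]

-- ===== VERDICT (by name: the statement is the Claim_ definition above) =====
theorem ruleid_deps_py_spec : Claim_equal_ruleid_deps_py := by
  intro ruleid name _
  unfold Spec_ruleid_deps_py ruleid_deps_py ruleid_deps_py_alt
  rw [pv_foldB]
  simp only [List.cons_append, List.nil_append, List.tail_cons]
  rw [pv_zip_chain, pv_accs_eq]
  have hlen : (ruleid ++ [name]).length = ruleid.length + 1 := by simp
  rw [hlen, pv_chain_map_range]
  simp only [String.empty_append]
  congr 1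
  · rw [PySem.List.slice_to (ruleid ++ [name]) (by norm_num)]
    norm_num
  · rw [PySem.List.pyRange_one, List.map_map]
    have h3 : ((ruleid.length + 1 : Nat) : Int) - 1 = (ruleid.length : Int) := by
      push_cast; ring
    rw [h3, Int.toNat_natCast]
    apply List.map_congr_left
    intro k _
    simp only [Function.comp]
    rw [PySem.List.slice_to (ruleid ++ [name]) (b := 1 + (k : Int)) (by positivity),
        PySem.List.slice_to (ruleid ++ [name]) (b := 1 + (k : Int) + 1) (by positivity)]
    have h1 : ((1 : Int) + k).toNat = k + 1 := by omega
    have h2 : ((1 : Int) + k + 1).toNat = k + 2 := by omega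
    rw [h1, h2]
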